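-- pv_equiv track=rewrite | github.com/MouinulIslamNJIT/BallotChange | calculateMargin.py | findq_multi
-- ===== SOURCE A (Python) =====
-- def findq_multi(Lv,Lc,portions):
--     group_count = dict.fromkeys(portions.keys(),0)
--     qmin = 0
--     qmax = 0
--     for (c,v) in zip(Lc,Lv):
--         group_count[c] += 1
--         if qmax == 0 and group_count[c] == portions[c]:
--             qmax = v
--         if qmax != 0 and group_count[c] == portions[c]:
--             qmin = v
--     return qmin,qmax
-- ===== SOURCE B (Python) =====
-- def findq_multi(Lv, Lc, portions):
--     # Count DOWN a copy of portions; collect each value whose group just completed,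
--     # then select: qmax = first nonzero completion, qmin = last completion (0 if qmax stayed 0).
--     remaining = dict(portions)
--     completions = []
--     for c, v in zip(Lc, Lv):
--         remaining[c] -= 1
--         if remaining[c] == 0:
--             completions.append(v)
--     qmax = 0
--     for v in completions:
--         if v != 0:
--             qmax = v
--             break
--     qmin = completions[-1] if qmax != 0 else 0
--     return qmin, qmax
-- ===== Notes on version B (the rewrite author's own statement) =====
-- stated objective: alternative
-- what changed: Replaces A's run-up counters with inline sentinel updates of qmin/qmax by a countdown copy of portions that collects completion events into a list, followed by a separate selection pass (qmax = first nonzero event, qmin = last event if qmax became nonzero).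
import Mathlib
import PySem

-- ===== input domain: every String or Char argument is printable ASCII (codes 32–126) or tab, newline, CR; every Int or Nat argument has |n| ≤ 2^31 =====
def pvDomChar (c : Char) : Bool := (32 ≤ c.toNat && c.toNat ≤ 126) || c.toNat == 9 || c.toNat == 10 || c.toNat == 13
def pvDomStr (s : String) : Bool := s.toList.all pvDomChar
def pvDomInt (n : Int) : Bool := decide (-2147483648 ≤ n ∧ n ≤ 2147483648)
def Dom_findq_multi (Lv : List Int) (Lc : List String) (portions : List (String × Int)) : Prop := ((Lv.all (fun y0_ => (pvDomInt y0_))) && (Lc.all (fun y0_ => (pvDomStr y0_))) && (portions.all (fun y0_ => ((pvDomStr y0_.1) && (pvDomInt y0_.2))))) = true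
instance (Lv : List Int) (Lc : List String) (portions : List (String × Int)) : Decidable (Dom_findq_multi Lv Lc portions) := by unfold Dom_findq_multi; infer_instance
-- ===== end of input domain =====

-- B replaces A's run-up counters with inline qmin/qmax sentinel updates by a countdown
-- dict collecting completion events, then a separate selection pass (objective: alternative).

-- ===== PORT A =====
-- literal port of A: one fold over zip(Lc,Lv) carrying (group_count, qmin, qmax);
-- group_count[c] += 1 and portions[c] are ported with getD _ 0 — exact under Pre_ (key present; missing key = KeyError).
def stepA (portions : List (String × Int)) (s : PySem.Dict String Int × Int × Int) (cv : String × Int) : PySem.Dict String Int × Int × Int :=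
  let cnt := s.1.getD cv.1 0 + 1                         -- group_count[c] += 1
  let p := (PySem.Dict.mk portions).getD cv.1 0          -- portions[c]
  let qmax' := if s.2.2 = 0 ∧ cnt = p then cv.2 else s.2.2
  let qmin' := if qmax' ≠ 0 ∧ cnt = p then cv.2 else s.2.1
  (s.1.insert cv.1 cnt, qmin', qmax')

def findq_multi (Lv : List Int) (Lc : List String) (portions : List (String × Int)) : Int × Int :=
  let gc0 : PySem.Dict String Int := PySem.Dict.mk (portions.map fun kv => (kv.1, 0))  -- dict.fromkeys(portions.keys(), 0)
  let res := (Lc.zip Lv).foldl (stepA portions) (gc0, 0, 0)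
  (res.2.1, res.2.2)

-- ===== PORT B =====
-- B-side helper: 'for v in completions: if v != 0: qmax = v; break'
def firstNonzero : List Int → Int
  | [] => 0
  | v :: t => if v ≠ 0 then v else firstNonzero t

-- literal port of B: countdown fold collecting completions, then the selection pass.
def stepB (s : PySem.Dict String Int × List Int) (cv : String × Int) : PySem.Dict String Int × List Int :=
  let r := s.1.getD cv.1 0 - 1                           -- remaining[c] -= 1
  (s.1.insert cv.1 r, if r = 0 then s.2 ++ [cv.2] else s.2)

def findq_multi_alt (Lv : List Int) (Lc : List String) (portions : List (String × Int)) : Int × Int :=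
  let res := (Lc.zip Lv).foldl stepB (PySem.Dict.mk portions, [])  -- remaining = dict(portions)
  let completions := res.2
  let qmax := firstNonzero completions
  let qmin := if qmax ≠ 0 then (PySem.List.pyGet? completions (-1)).getD 0 else 0  -- completions[-1]
  (qmin, qmax)

-- ===== PRECONDITION & SPEC =====
-- Pre_ excludes exactly the inputs where both Pythons raise KeyError: some zipped group label is not a key of portions.
def Pre_findq_multi (Lv : List Int) (Lc : List String) (portions : List (String × Int)) : Prop :=
  ∀ cv ∈ Lc.zip Lv, cv.1 ∈ portions.map Prod.fst
instance (Lv : List Int) (Lc : List String) (portions : List (String × Int)) : Decidable (Pre_findq_multi Lv Lc portions) := by unfold Pre_findq_multi; infer_instance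
def pvWitness_findq_multi : List Int × List String × (List (String × Int)) :=
  ([7, 0, 5], ["a", "b", "a"], [("a", 2), ("b", 1)])

def Spec_findq_multi (Lv : List Int) (Lc : List String) (portions : List (String × Int)) (out : Int × Int) : Prop := out = findq_multi_alt Lv Lc portions
instance (Lv : List Int) (Lc : List String) (portions : List (String × Int)) (out : Int × Int) : Decidable (Spec_findq_multi Lv Lc portions out) := by unfold Spec_findq_multi; infer_instance

-- ===== CLAIM (what is proved, stated in full; the proofs are below) =====
def Claim_equal_findq_multi : Prop := ∀ (Lv : List Int) (Lc : List String) (portions : List (String × Int)), Dom_findq_multi Lv Lc portions → Pre_findq_multi Lv Lc portions → Spec_findq_multi Lv Lc portions (findq_multi Lv Lc portions)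

-- ===== LEMMAS AND PROOFS =====

-- the effect of one completion event v on A's (qmin, qmax) state
def evStep (q : Int × Int) (v : Int) : Int × Int :=
  let qmax := if q.2 = 0 then v else q.2
  ((if qmax ≠ 0 then v else q.1), qmax)

-- the completion events of the run, in order, phrased with B's countdown state
def events (rem : PySem.Dict String Int) : List (String × Int) → List Int
  | [] => []
  | cv :: t =>
      let r := rem.getD cv.1 0 - 1
      (if r = 0 then [cv.2] else []) ++ events (rem.insert cv.1 r) t

-- B's counting loop produces exactly `events`
theorem loopB : ∀ (pairs : List (String × Int)) (rem : PySem.Dict String Int) (acc : List Int),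
    (pairs.foldl stepB (rem, acc)).2 = acc ++ events rem pairs := by
  intro pairs
  induction pairs with
  | nil => intro rem acc; simp [events]
  | cons cv t ih =>
      intro rem acc
      simp only [List.foldl_cons, events, stepB]
      rw [ih]
      by_cases h : rem.getD cv.1 0 - 1 = 0 <;> simp [h]

-- A's loop equals folding evStep over the same events, under the countdown invariant
theorem loopA (portions : List (String × Int)) :
    ∀ (pairs : List (String × Int)) (gc rem : PySem.Dict String Int) (qmin qmax : Int),
      (∀ c, rem.getD c 0 = (PySem.Dict.mk portions).getD c 0 - gc.getD c 0) →
      (pairs.foldl (stepA portions) (gc, qmin, qmax)).2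
        = (events rem pairs).foldl evStep (qmin, qmax) := by
  intro pairs
  induction pairs with
  | nil => intro gc rem qmin qmax _; simp [events]
  | cons cv t ih =>
      intro gc rem qmin qmax hinv
      simp only [List.foldl_cons, events, stepA]
      have hcond : (rem.getD cv.1 0 - 1 = 0) ↔
          (gc.getD cv.1 0 + 1 = (PySem.Dict.mk portions).getD cv.1 0) := by
        have := hinv cv.1; omega
      have hinv' : ∀ c, (rem.insert cv.1 (rem.getD cv.1 0 - 1)).getD c 0
          = (PySem.Dict.mk portions).getD c 0 - (gc.insert cv.1 (gc.getD cv.1 0 + 1)).getD c 0 := by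
        intro c
        rw [PySem.Dict.getD_insert, PySem.Dict.getD_insert]
        by_cases h : c = cv.1
        · simp [h]; have := hinv cv.1; omega
        · simp [h, hinv c]
      by_cases h : rem.getD cv.1 0 - 1 = 0
      · have hc : gc.getD cv.1 0 + 1 = (PySem.Dict.mk portions).getD cv.1 0 := hcond.mp h
        rw [ih _ _ _ _ hinv']
        simp [h, hc, evStep]
      · have hc : ¬ (gc.getD cv.1 0 + 1 = (PySem.Dict.mk portions).getD cv.1 0) := fun hh => h (hcond.mpr hh)
        rw [ih _ _ _ _ hinv']
        simp [h, hc]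

-- the initial zero-dict really reads 0 everywhere
theorem getD_mk_zero (portions : List (String × Int)) (c : String) :
    (PySem.Dict.mk (portions.map fun kv => (kv.1, (0 : Int)))).getD c 0 = 0 := by
  induction portions with
  | nil => rfl
  | cons kv t ih =>
      simp only [List.map_cons, PySem.Dict.getD_eq_get?_getD, PySem.Dict.get?_mk_cons]
      by_cases h : kv.1 == c
      · simp [h]
      · simpa [h, PySem.Dict.getD_eq_get?_getD] using ih

-- getLast?.getD ignores its default on a nonempty list
theorem lastD_irrel (l : List Int) (h : l ≠ []) (a b : Int) :
    l.getLast?.getD a = l.getLast?.getD b := by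
  obtain ⟨x, hx⟩ := Option.isSome_iff_exists.mp (List.getLast?_isSome.mpr h)
  rw [hx]; rfl

-- getLast? skips the head of a list with a nonempty tail
theorem last_cons (x : Int) (t : List Int) (h : t ≠ []) :
    (x :: t).getLast? = t.getLast? := by
  cases t with
  | nil => exact absurd rfl h
  | cons w s => exact List.getLast?_cons_cons

-- selection, second phase: once qmax ≠ 0, every further event overwrites qmin
theorem sel_tail (E : List Int) : ∀ (qmin qmax : Int), qmax ≠ 0 →
    E.foldl evStep (qmin, qmax) = (E.getLast?.getD qmin, qmax) := by
  induction E with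
  | nil => intro qmin qmax h; simp
  | cons v t ih =>
      intro qmin qmax h
      have h1 : evStep (qmin, qmax) v = (v, qmax) := by simp [evStep, h]
      rw [List.foldl_cons, h1, ih v qmax h]
      cases t with
      | nil => simp
      | cons w s =>
          rw [last_cons v (w :: s) (List.cons_ne_nil w s)]
          exact congrArg (fun z => (z, qmax)) (lastD_irrel _ (List.cons_ne_nil w s) v qmin)

-- selection: folding evStep from (q, 0) picks (last event, first nonzero event)
theorem sel (E : List Int) : ∀ (q : Int),
    E.foldl evStep (q, 0) =
      (if firstNonzero E = 0 then q else E.getLast?.getD 0, firstNonzero E) := by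
  induction E with
  | nil => intro q; simp [firstNonzero]
  | cons v t ih =>
      intro q
      by_cases hv : v = 0
      · subst hv
        have h1 : evStep (q, 0) 0 = (q, 0) := by simp [evStep]
        have h2 : firstNonzero ((0 : Int) :: t) = firstNonzero t := by simp [firstNonzero]
        rw [List.foldl_cons, h1, ih q, h2]
        by_cases h0 : firstNonzero t = 0
        · simp [h0]
        · have ht : t ≠ [] := fun he => h0 (by simp [he, firstNonzero])
          simp [h0, last_cons 0 t ht]
      · have h1 : evStep (q, 0) v = (v, v) := by simp [evStep, hv]
        have h2 : firstNonzero (v :: t) = v := by simp [firstNonzero, hv]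
        rw [List.foldl_cons, h1, sel_tail t v v hv, h2]
        cases t with
        | nil => simp [hv]
        | cons w s =>
            rw [last_cons v (w :: s) (List.cons_ne_nil w s), if_neg hv]
            exact congrArg (fun z => (z, v)) (lastD_irrel _ (List.cons_ne_nil w s) v 0)

-- ===== VERDICT (by name: the statement is the Claim_ definition above) =====
theorem findq_multi_spec : Claim_equal_findq_multi := by
  intro Lv Lc portions _ _
  unfold Spec_findq_multi
  simp only [findq_multi, findq_multi_alt]
  rw [Prod.mk.eta, loopB, loopA portions (Lc.zip Lv) _ (PySem.Dict.mk portions) 0 0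
      (fun c => by rw [getD_mk_zero]; ring), sel]
  simp only [List.nil_append, PySem.List.pyGet?_neg_one]
  by_cases h : firstNonzero (events (PySem.Dict.mk portions) (Lc.zip Lv)) = 0 <;> simp [h]
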